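-- pv_equiv track=rewrite | github.com/pthompson8594/3am-AI | autonomous.py | _extract_next
-- ===== SOURCE A (Python) =====
-- from typing import Optional
--
-- def _extract_next(response: str) -> Optional[str]:
--     """
--     Find the last line starting with 'NEXT:' in the response and return
--     the question text after it.  Case-insensitive.
--     """
--     for line in reversed(response.splitlines()):
--         stripped = line.strip()
--         if stripped.upper().startswith("NEXT:"):
--             question = stripped[5:].strip()
--             if question:
--                 return question
--     return None
-- ===== SOURCE B (Python) =====
-- from typing import Optional
--
-- def _extract_next(response: str) -> Optional[str]:
--     """Forward pass over the lines, remembering the last valid NEXT: question."""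
--     last_match = None
--     for line in response.splitlines():
--         stripped = line.strip()
--         if stripped.upper().startswith("NEXT:"):
--             question = stripped[5:].strip()
--             if question:
--                 last_match = question
--     return last_match
-- ===== Notes on version B (the rewrite author's own statement) =====
-- stated objective: alternative
-- what changed: Replaces A's reverse scan with early return by a single forward pass over the lines that keeps the last qualifying question in an accumulator.
import Mathlib
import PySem

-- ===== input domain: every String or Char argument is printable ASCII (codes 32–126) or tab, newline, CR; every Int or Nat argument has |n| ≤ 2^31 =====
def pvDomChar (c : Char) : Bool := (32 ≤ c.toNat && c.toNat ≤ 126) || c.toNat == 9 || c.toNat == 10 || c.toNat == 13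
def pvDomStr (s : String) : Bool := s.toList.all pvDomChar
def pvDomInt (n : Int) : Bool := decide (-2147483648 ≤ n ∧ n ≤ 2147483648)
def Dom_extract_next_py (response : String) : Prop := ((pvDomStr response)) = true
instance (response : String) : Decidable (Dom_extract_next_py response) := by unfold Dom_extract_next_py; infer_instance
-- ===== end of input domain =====

-- B replaces A's reverse scan with early return by one forward pass keeping the last
-- qualifying question in an accumulator (objective: alternative decomposition, same cost).

-- ===== PORT A =====
-- the reversed-order 'for' loop with early return, as structural recursion
def extract_next_py_loop : List String → Option String
  | [] => none
  | line :: rest =>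
    let stripped := PySem.Str.strip line
    if PySem.Str.startswith (PySem.Str.upper stripped) "NEXT:" then
      let question := PySem.Str.strip (PySem.Str.slice stripped (some 5) none)
      if question ≠ "" then some question else extract_next_py_loop rest
    else extract_next_py_loop rest

def extract_next_py (response : String) : Option String :=
  extract_next_py_loop (PySem.Str.splitlines response).reverse

-- ===== PORT B =====
def extract_next_py_alt (response : String) : Option String :=
  (PySem.Str.splitlines response).foldl
    (fun last_match line =>
      let stripped := PySem.Str.strip line
      if PySem.Str.startswith (PySem.Str.upper stripped) "NEXT:" then
        let question := PySem.Str.strip (PySem.Str.slice stripped (some 5) none)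
        if question ≠ "" then some question else last_match
      else last_match)
    none

-- ===== PRECONDITION & SPEC =====
def Spec_extract_next_py (response : String) (out : Option String) : Prop := out = extract_next_py_alt response
instance (response : String) (out : Option String) : Decidable (Spec_extract_next_py response out) := by unfold Spec_extract_next_py; infer_instance

-- ===== CLAIM (what is proved, stated in full; the proofs are below) =====
def Claim_equal_extract_next_py : Prop := ∀ (response : String), Dom_extract_next_py response → Spec_extract_next_py response (extract_next_py response)

-- ===== LEMMAS AND PROOFS =====

-- A's reverse scan distributes over append: first match of a ++ b is a's, else b's
theorem extract_next_py_loop_append (a b : List String) :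
    extract_next_py_loop (a ++ b) =
      ((extract_next_py_loop a).rec (extract_next_py_loop b) (fun q => some q) : Option String) := by
  induction a with
  | nil => rfl
  | cons x xs ih =>
    simp only [List.cons_append, extract_next_py_loop]
    split_ifs <;> simp [ih]

-- B's forward fold with accumulator equals A's scan of the reversed list (else the accumulator)
theorem foldl_eq_loop_reverse (l : List String) (acc : Option String) :
    l.foldl
      (fun last_match line =>
        let stripped := PySem.Str.strip line
        if PySem.Str.startswith (PySem.Str.upper stripped) "NEXT:" then
          let question := PySem.Str.strip (PySem.Str.slice stripped (some 5) none)
          if question ≠ "" then some question else last_match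
        else last_match)
      acc =
      ((extract_next_py_loop l.reverse).rec acc (fun q => some q) : Option String) := by
  induction l generalizing acc with
  | nil => rfl
  | cons x xs ih =>
    simp only [List.foldl_cons, List.reverse_cons, extract_next_py_loop_append, ih]
    cases h : extract_next_py_loop xs.reverse <;>
      simp only [extract_next_py_loop] <;> split_ifs <;> rfl

-- ===== VERDICT (by name: the statement is the Claim_ definition above) =====
theorem extract_next_py_spec : Claim_equal_extract_next_py := by
  intro response _
  unfold Spec_extract_next_py extract_next_py extract_next_py_alt
  rw [foldl_eq_loop_reverse]
  cases extract_next_py_loop (PySem.Str.splitlines response).reverse <;> rfl
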